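-- pv_equiv track=rewrite | github.com/wensicm/RecetONA | mcp/lambda/recetona_mcp_api/local_rag_server.py | _select_runtime_cells
-- ===== SOURCE A (Python) =====
-- def _select_runtime_cells(code_cells: list[str]) -> list[str]:
--     selected = []
--     markers = [
--         "EMBED_MODEL =",
--         "def _clean(v):",
--         "client = OpenAI",
--         "embeddings = ensure_embeddings(chunks)",
--         "def ask_agent(",
--     ]
--     for marker in markers:
--         match = next((c for c in code_cells if marker in c), None)
--         if not match:
--             raise RuntimeError(
--                 f"No se encontro la celda requerida con marcador: {marker}"
--             )
--         selected.append(match)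
--     return selected
-- ===== SOURCE B (Python) =====
-- def _select_runtime_cells(code_cells: list[str]) -> list[str]:
--     markers = [
--         "EMBED_MODEL =",
--         "def _clean(v):",
--         "client = OpenAI",
--         "embeddings = ensure_embeddings(chunks)",
--         "def ask_agent(",
--     ]
--     # Single pass over the cells: record, for each marker still missing,
--     # the first cell that contains it.
--     found = {}
--     for c in code_cells:
--         for m in markers:
--             if m not in found and m in c:
--                 found[m] = c
--     selected = []
--     for m in markers:
--         if m not in found:
--             raise RuntimeError(
--                 f"No se encontro la celda requerida con marcador: {m}"
--             )
--         selected.append(found[m])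
--     return selected
-- ===== Notes on version B (the rewrite author's own statement) =====
-- stated objective: alternative
-- what changed: B makes a single pass over code_cells building a dict from each not-yet-found marker to its first matching cell, then assembles the output by one lookup per marker, instead of re-scanning all cells for every marker.
import Mathlib
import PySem

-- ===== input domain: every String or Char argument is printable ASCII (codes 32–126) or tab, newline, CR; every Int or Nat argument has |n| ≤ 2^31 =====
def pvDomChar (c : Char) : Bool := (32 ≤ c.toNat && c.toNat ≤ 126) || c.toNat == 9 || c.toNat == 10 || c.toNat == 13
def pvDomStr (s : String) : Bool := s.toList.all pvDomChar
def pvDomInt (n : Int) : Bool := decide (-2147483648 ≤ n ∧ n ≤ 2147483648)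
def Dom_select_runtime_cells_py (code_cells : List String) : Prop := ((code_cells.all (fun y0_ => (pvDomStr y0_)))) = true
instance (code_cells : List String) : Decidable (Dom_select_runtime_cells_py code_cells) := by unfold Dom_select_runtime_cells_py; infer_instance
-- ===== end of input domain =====

-- B replaces A's per-marker rescan of code_cells by one pass building a first-match dict (alternative decomposition);
-- where Python raises RuntimeError (a marker with no matching cell) both ports stop and return the cells selected so far,
-- and Pre_ excludes exactly those inputs.

-- ===== PORT A =====
def pvMarkersA : List String :=
  ["EMBED_MODEL =", "def _clean(v):", "client = OpenAI",
   "embeddings = ensure_embeddings(chunks)", "def ask_agent("]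

-- the 'for marker in markers' loop; the RuntimeError stops the loop with no further cells selected
def pvLoopA (code_cells : List String) : List String → List String
  | [] => []
  | m :: ms =>
    match code_cells.find? (fun c => PySem.Str.isIn m c) with
    | none => []           -- raise RuntimeError (outside Pre_)
    | some c => c :: pvLoopA code_cells ms

def select_runtime_cells_py (code_cells : List String) : List String :=
  pvLoopA code_cells pvMarkersA

-- ===== PORT B =====
def pvMarkersB : List String :=
  ["EMBED_MODEL =", "def _clean(v):", "client = OpenAI",
   "embeddings = ensure_embeddings(chunks)", "def ask_agent("]

-- the single pass: for each cell, record it for every still-missing marker it contains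
def pvPassB (markers : List String) (code_cells : List String) : PySem.Dict String String :=
  code_cells.foldl
    (fun d c =>
      markers.foldl
        (fun d m => if ¬ d.contains m = true ∧ PySem.Str.isIn m c = true then d.insert m c else d) d)
    PySem.Dict.empty

-- the final markers-order loop; the RuntimeError stops the loop with no further cells selected
def pvAssembleB (found : PySem.Dict String String) : List String → List String
  | [] => []
  | m :: ms =>
    match found.get? m with
    | none => []           -- raise RuntimeError (outside Pre_)
    | some c => c :: pvAssembleB found ms

def select_runtime_cells_py_alt (code_cells : List String) : List String :=
  pvAssembleB (pvPassB pvMarkersB code_cells) pvMarkersB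

-- ===== PRECONDITION & SPEC =====
-- Pre_ excludes exactly the inputs where Python A raises RuntimeError: some required marker occurs in no cell.
def Pre_select_runtime_cells_py (code_cells : List String) : Prop :=
  (pvMarkersA.all (fun m => code_cells.any (fun c => PySem.Str.isIn m c))) = true
instance (code_cells : List String) : Decidable (Pre_select_runtime_cells_py code_cells) := by
  unfold Pre_select_runtime_cells_py; infer_instance

def pvWitness_select_runtime_cells_py : List String :=
  ["EMBED_MODEL = m", "def _clean(v): pass", "client = OpenAI()",
   "embeddings = ensure_embeddings(chunks)", "def ask_agent(q):"]

def Spec_select_runtime_cells_py (code_cells : List String) (out : List String) : Prop := out = select_runtime_cells_py_alt code_cells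
instance (code_cells : List String) (out : List String) : Decidable (Spec_select_runtime_cells_py code_cells out) := by unfold Spec_select_runtime_cells_py; infer_instance

-- ===== CLAIM (what is proved, stated in full; the proofs are below) =====
def Claim_equal_select_runtime_cells_py : Prop := ∀ (code_cells : List String), Dom_select_runtime_cells_py code_cells → Pre_select_runtime_cells_py code_cells → Spec_select_runtime_cells_py code_cells (select_runtime_cells_py code_cells)

-- ===== LEMMAS AND PROOFS =====


theorem pvInner_get? (p : String → Bool) (c : String) (ms : List String)
    (d : PySem.Dict String String) (m : String) :
    (ms.foldl (fun d m => if ¬ d.contains m = true ∧ p m = true then d.insert m c else d) d).get? m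
      = if m ∈ ms ∧ ¬ d.contains m = true ∧ p m = true then some c else d.get? m := by
  induction ms generalizing d with
  | nil => simp
  | cons m' rest ih =>
    simp only [List.foldl_cons]
    by_cases hstep : ¬ d.contains m' = true ∧ p m' = true
    · rw [if_pos hstep, ih]
      simp only [PySem.Dict.get?_insert, PySem.Dict.contains_insert, List.mem_cons]
      by_cases hm : m = m'
      · subst hm; simp [hstep.1, hstep.2]
      · simp [hm]
    · rw [if_neg hstep, ih]
      by_cases hm : m = m'
      · subst hm
        push Not at hstep
        by_cases hc : d.contains m = true
        · simp [hc]
        · simp [hc, hstep (by simp [hc])]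
      · simp [hm]

theorem pvPass_fold (ms : List String) (cc : List String) (d : PySem.Dict String String)
    (m : String) (hm : m ∈ ms) :
    (cc.foldl (fun d c => ms.foldl
        (fun d m => if ¬ d.contains m = true ∧ PySem.Str.isIn m c = true then d.insert m c else d) d) d).get? m
      = (d.get? m).or (cc.find? (fun c => PySem.Str.isIn m c)) := by
  induction cc generalizing d with
  | nil => simp
  | cons c rest ih =>
    simp only [List.foldl_cons]
    rw [ih, pvInner_get? (fun m => PySem.Str.isIn m c) c ms d m]
    by_cases hc : d.contains m = true
    · have hs : (d.get? m).isSome := by rw [← PySem.Dict.contains_eq_isSome_get?, hc]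
      obtain ⟨v, hv⟩ := Option.isSome_iff_exists.mp hs
      simp [hc, hv]
    · have hn : d.get? m = none := by
        rw [PySem.Dict.get?_eq_none_iff_contains]; simpa using hc
      by_cases hin : PySem.Chars.isIn m.toList c.toList = true
      · simp [hm, hc, hin, hn]
      · simp only [hn, Option.none_or, List.find?_cons]
        simp [hc, hin]


-- agreement of the two output loops given the pass/find? correspondence
theorem pvAssemble_eq_loop (cc : List String) (found : PySem.Dict String String)
    (l : List String)
    (h : ∀ m ∈ l, found.get? m = cc.find? (fun c => PySem.Str.isIn m c)) :
    pvAssembleB found l = pvLoopA cc l := by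
  induction l with
  | nil => rfl
  | cons m ms ih =>
    simp only [pvAssembleB, pvLoopA, h m (List.mem_cons_self ..)]
    cases cc.find? (fun c => PySem.Str.isIn m c) with
    | none => rfl
    | some c => rw [ih (fun m hm => h m (List.mem_cons_of_mem _ hm))]

-- ===== VERDICT (by name: the statement is the Claim_ definition above) =====
theorem select_runtime_cells_py_spec : Claim_equal_select_runtime_cells_py := by
  intro cc _ _
  unfold Spec_select_runtime_cells_py select_runtime_cells_py select_runtime_cells_py_alt
  rw [pvAssemble_eq_loop cc (pvPassB pvMarkersB cc) pvMarkersB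
    (fun m hm => by
      unfold pvPassB
      rw [pvPass_fold pvMarkersB cc PySem.Dict.empty m hm]
      simp [PySem.Dict.get?_empty])]
  rfl
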